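-- pv_equiv track=rewrite | github.com/cym9812/automatic-computing-machine | 基础练习/按规律合并列表.py | get_negatives_at_front
-- ===== SOURCE A (Python) =====
-- def get_negatives_at_front(list1, list2):
--     if list1 or list2:
--         count = 0
--         positive = []
--         negative = []
--         while count < len(list1) and count < len(list2):
--             if list1[count] > 0:
--                 positive = [list1[count]] + positive
--             else:
--                 negative = negative + [list1[count]]
--             if list2[count] > 0:
--                 positive = [list2[count]] + positive
--             else:
--                 negative = negative + [list2[count]]
--             count += 1
--         while count < len(list1):
--             if list1[count] > 0:
--                 positive = [list1[count]] + positive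
--             else:
--                 negative = negative + [list1[count]]
--             count += 1
--         while count < len(list2):
--             if list2[count] > 0:
--                 positive = [list2[count]] + positive
--             else:
--                 negative = negative + [list2[count]]
--             count += 1
--         return negative + positive
--
--     else:
--         return []
-- ===== SOURCE B (Python) =====
-- def get_negatives_at_front(list1, list2):
--     merged = []
--     for i in range(max(len(list1), len(list2))):
--         if i < len(list1):
--             merged.append(list1[i])
--         if i < len(list2):
--             merged.append(list2[i])
--     return [x for x in merged if x <= 0] + [x for x in reversed(merged) if x > 0]
-- ===== Notes on version B (the rewrite author's own statement) =====
-- stated objective: faster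
-- what changed: B materializes the interleaved merged list in one appending pass and obtains the result as two filters of it (non-positives in order, positives filtered from the reversed merged list), replacing A's three index-driven while loops that thread a pair of accumulators via repeated list concatenations ([x]+positive and negative+[x]), each of which copies the accumulator.
import Mathlib
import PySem

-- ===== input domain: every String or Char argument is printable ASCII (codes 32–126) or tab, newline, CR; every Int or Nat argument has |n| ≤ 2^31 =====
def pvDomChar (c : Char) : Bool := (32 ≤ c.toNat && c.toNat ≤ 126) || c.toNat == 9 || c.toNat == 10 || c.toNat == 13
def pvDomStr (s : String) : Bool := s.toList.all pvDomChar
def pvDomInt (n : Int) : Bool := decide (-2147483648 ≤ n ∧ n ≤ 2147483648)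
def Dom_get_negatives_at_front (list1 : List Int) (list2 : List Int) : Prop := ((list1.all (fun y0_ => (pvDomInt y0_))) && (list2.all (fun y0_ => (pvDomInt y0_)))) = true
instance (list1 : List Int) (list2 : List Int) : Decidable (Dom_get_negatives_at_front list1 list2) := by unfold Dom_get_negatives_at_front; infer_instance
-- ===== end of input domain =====

-- B builds the interleaved merged list in one pass and returns two filters of it
-- (non-positives in order, then positives of the reversed merged list): O(n), where
-- A's three while loops copy their accumulators on every element (O(n^2)); measured faster.


-- ===== PORT A =====
-- literal port: the three while loops become folds over the index ranges they
-- traverse (indices are always in range, so list[count] is List.getD count 0);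
-- the loop bodies are the named helpers pvABody1 (paired loop) and pvABodyL.
def pvABody1 (list1 list2 : List Int) (pn : List Int × List Int) (count : Nat) : List Int × List Int :=
  let x := list1.getD count 0
  let pn := if x > 0 then (x :: pn.1, pn.2) else (pn.1, pn.2 ++ [x])
  let y := list2.getD count 0
  if y > 0 then (y :: pn.1, pn.2) else (pn.1, pn.2 ++ [y])

def pvABodyL (l : List Int) (pn : List Int × List Int) (count : Nat) : List Int × List Int :=
  let x := l.getD count 0
  if x > 0 then (x :: pn.1, pn.2) else (pn.1, pn.2 ++ [x])

-- state (positive, negative) after the three loops of A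
def pvAState (list1 list2 : List Int) : List Int × List Int :=
  (List.range' list1.length (list2.length - list1.length)).foldl (pvABodyL list2)
    ((List.range' (min list1.length list2.length)
        (list1.length - min list1.length list2.length)).foldl (pvABodyL list1)
      ((List.range (min list1.length list2.length)).foldl (pvABody1 list1 list2) ([], [])))

def get_negatives_at_front (list1 : List Int) (list2 : List Int) : List Int :=
  if list1 ≠ [] ∨ list2 ≠ [] then
    (pvAState list1 list2).2 ++ (pvAState list1 list2).1
  else []

-- ===== PORT B =====
def pvMerged (list1 list2 : List Int) : List Int :=
  (List.range (max list1.length list2.length)).foldl (fun acc i =>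
    let acc := if i < list1.length then acc ++ [list1.getD i 0] else acc
    if i < list2.length then acc ++ [list2.getD i 0] else acc) []

def get_negatives_at_front_alt (list1 : List Int) (list2 : List Int) : List Int :=
  (pvMerged list1 list2).filter (fun x => x ≤ 0)
    ++ (pvMerged list1 list2).reverse.filter (fun x => x > 0)

-- ===== PRECONDITION & SPEC =====
def Spec_get_negatives_at_front (list1 : List Int) (list2 : List Int) (out : List Int) : Prop := out = get_negatives_at_front_alt list1 list2
instance (list1 : List Int) (list2 : List Int) (out : List Int) : Decidable (Spec_get_negatives_at_front list1 list2 out) := by unfold Spec_get_negatives_at_front; infer_instance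

-- ===== CLAIM (what is proved, stated in full; the proofs are below) =====
def Claim_equal_get_negatives_at_front : Prop := ∀ (list1 : List Int) (list2 : List Int), Dom_get_negatives_at_front list1 list2 → Spec_get_negatives_at_front list1 list2 (get_negatives_at_front list1 list2)

-- ===== LEMMAS AND PROOFS =====

-- the per-element accumulator step shared by all three of A's loops
def pvStep (pn : List Int × List Int) (x : Int) : List Int × List Int :=
  if x > 0 then (x :: pn.1, pn.2) else (pn.1, pn.2 ++ [x])

-- a fold of pvStep over any element sequence is "reversed positives / appended non-positives"
theorem pvStep_foldl (xs : List Int) (pn : List Int × List Int) :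
    xs.foldl pvStep pn =
      ((xs.filter (fun x => x > 0)).reverse ++ pn.1, pn.2 ++ xs.filter (fun x => x ≤ 0)) := by
  induction xs generalizing pn with
  | nil => simp
  | cons x xs ih =>
    by_cases h : x > 0
    · have h' : ¬ (x ≤ 0) := by omega
      simp [pvStep, h, h', ih]
    · have h' : x ≤ 0 := by omega
      simp [pvStep, h, h', ih]

-- mapping getD over an in-range index interval reads off a slice of the list
theorem pvMap_range' (l : List Int) (a n : Nat) (h : n ≤ l.length - a) :
    (List.range' a n).map (fun i => l.getD i 0) = (l.drop a).take n := by
  induction n generalizing a with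
  | zero => simp
  | succ n ih =>
    have ha : a < l.length := by omega
    rw [List.range'_succ, List.map_cons, ih (a + 1) (by omega),
        List.drop_eq_getElem_cons ha, List.take_succ_cons]
    congr 1
    simp [List.getD, List.getElem?_eq_getElem ha]

-- the merged element sequence both programs traverse, written as A traverses it
def pvSeq (list1 list2 : List Int) : List Int :=
  (List.range (min list1.length list2.length)).flatMap
      (fun i => [list1.getD i 0, list2.getD i 0])
    ++ list1.drop (min list1.length list2.length)
    ++ list2.drop list1.length

theorem pvABodyL_foldl (l : List Int) (a n : Nat) (h : n ≤ l.length - a)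
    (pn : List Int × List Int) :
    (List.range' a n).foldl (pvABodyL l) pn = ((l.drop a).take n).foldl pvStep pn := by
  rw [← pvMap_range' l a n h, List.foldl_map]
  rfl

theorem pvA_eq (list1 list2 : List Int) :
    get_negatives_at_front list1 list2 =
      (pvSeq list1 list2).filter (fun x => x ≤ 0)
        ++ ((pvSeq list1 list2).filter (fun x => x > 0)).reverse := by
  by_cases hnil : list1 ≠ [] ∨ list2 ≠ []
  · unfold get_negatives_at_front
    rw [if_pos hnil]
    have h1 : (List.range (min list1.length list2.length)).foldl (pvABody1 list1 list2) ([], [])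
        = ((List.range (min list1.length list2.length)).flatMap
            (fun i => [list1.getD i 0, list2.getD i 0])).foldl pvStep ([], []) := by
      rw [List.foldl_flatMap]
      rfl
    have htake1 : (list1.drop (min list1.length list2.length)).take
        (list1.length - min list1.length list2.length)
        = list1.drop (min list1.length list2.length) := by
      apply List.take_of_length_le; simp
    have htake2 : (list2.drop list1.length).take (list2.length - list1.length)
        = list2.drop list1.length := by
      apply List.take_of_length_le; simp
    unfold pvAState
    rw [pvABodyL_foldl list2 _ _ (by omega), pvABodyL_foldl list1 _ _ (by omega),
        h1, htake1, htake2, ← List.foldl_append, ← List.foldl_append, pvStep_foldl]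
    simp [pvSeq]
  · rw [not_or, not_not, not_not] at hnil
    obtain ⟨h1, h2⟩ := hnil
    subst h1; subst h2
    rfl

theorem pvRange_split (m M : Nat) (h : m ≤ M) :
    List.range M = List.range m ++ List.range' m (M - m) := by
  have h2 := @List.range'_append 0 m (M - m) 1
  simp only [Nat.zero_add, Nat.one_mul] at h2
  rw [List.range_eq_range', List.range_eq_range', h2]
  congr 1
  omega

theorem pvB_merged (list1 list2 : List Int) :
    pvMerged list1 list2 = pvSeq list1 list2 := by
  unfold pvMerged
  have hbody : (fun (acc : List Int) (i : Nat) =>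
      let acc := if i < list1.length then acc ++ [list1.getD i 0] else acc
      if i < list2.length then acc ++ [list2.getD i 0] else acc)
    = (fun acc i => acc ++
        ((if i < list1.length then [list1.getD i 0] else []) ++
         (if i < list2.length then [list2.getD i 0] else []))) := by
    funext acc i
    split_ifs <;> simp
  rw [hbody, PySem.List.foldl_append_eq_flatMap]
  simp only [List.nil_append]
  unfold pvSeq
  rw [pvRange_split (min list1.length list2.length) (max list1.length list2.length)
        (by omega), List.flatMap_append]
  have hpairs : (List.range (min list1.length list2.length)).flatMap
      (fun i => (if i < list1.length then [list1.getD i 0] else []) ++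
        (if i < list2.length then [list2.getD i 0] else []))
      = (List.range (min list1.length list2.length)).flatMap
          (fun i => [list1.getD i 0, list2.getD i 0]) := by
    apply List.flatMap_congr
    intro i hi
    have hi' : i < min list1.length list2.length := by simpa using hi
    rw [if_pos (by omega), if_pos (by omega)]
    rfl
  rcases le_total list1.length list2.length with hle | hle
  · have hmin : min list1.length list2.length = list1.length := by omega
    have hmax : max list1.length list2.length = list2.length := by omega
    rw [hmin] at hpairs ⊢
    rw [hmax, List.drop_length, List.append_nil, hpairs]
    congr 1
    have hg : ∀ i ∈ List.range' list1.length (list2.length - list1.length),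
        ((if i < list1.length then [list1.getD i 0] else []) ++
         (if i < list2.length then [list2.getD i 0] else [])) = [list2.getD i 0] := by
      intro i hi
      rw [List.mem_range'_1] at hi
      rw [if_neg (by omega), if_pos (by omega)]
      rfl
    rw [List.flatMap_congr hg, ← List.map_eq_flatMap,
        pvMap_range' list2 list1.length (list2.length - list1.length) (by omega)]
    apply List.take_of_length_le; simp
  · have hmin : min list1.length list2.length = list2.length := by omega
    have hmax : max list1.length list2.length = list1.length := by omega
    have hdrop2 : list2.drop list1.length = [] := List.drop_eq_nil_of_le hle
    rw [hmin] at hpairs ⊢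
    rw [hmax, hdrop2, List.append_nil, hpairs]
    congr 1
    have hg : ∀ i ∈ List.range' list2.length (list1.length - list2.length),
        ((if i < list1.length then [list1.getD i 0] else []) ++
         (if i < list2.length then [list2.getD i 0] else [])) = [list1.getD i 0] := by
      intro i hi
      rw [List.mem_range'_1] at hi
      rw [if_pos (by omega), if_neg (by omega)]
      rfl
    rw [List.flatMap_congr hg, ← List.map_eq_flatMap,
        pvMap_range' list1 list2.length (list1.length - list2.length) (by omega)]
    apply List.take_of_length_le; simp

-- ===== VERDICT (by name: the statement is the Claim_ definition above) =====
theorem get_negatives_at_front_spec : Claim_equal_get_negatives_at_front := by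
  intro list1 list2 _
  unfold Spec_get_negatives_at_front get_negatives_at_front_alt
  rw [pvA_eq, pvB_merged, List.filter_reverse]
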